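-- pv_equiv track=rewrite | github.com/ydb-platform/ydb | contrib/python/parglare/parglare/exceptions.py | get_line_col_at_position
-- ===== SOURCE A (Python) =====
-- from typing import Optional, Tuple
--
-- def get_line_col_at_position(
--     text: str, pos: int
-- ) -> Tuple[Optional[int], Optional[int], Optional[str], Optional[str]]:
--     lines = text.splitlines(keepends=True)
--
--     if pos > len(text):
--         # Position out of range
--         return None, None, None, None
--
--     # Special handling of EOF
--     if pos == len(text):
--         prev_line = lines[-2].rstrip("\n\r") if len(lines) > 1 else None
--         return (
--             len(lines) - 1,
--             len(lines[-1]),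
--             lines[-1].rstrip("\n\r"),
--             prev_line,
--         )
--
--     current_pos = 0
--     for lineidx, line in enumerate(lines):
--         if current_pos <= pos < current_pos + len(line):
--             prev_line = lines[lineidx - 1].rstrip("\n\r") if lineidx > 0 else None
--             return lineidx, pos - current_pos, line.rstrip("\n\r"), prev_line
--         current_pos += len(line)
--     return None, None, None, None
-- ===== SOURCE B (Python) =====
-- def get_line_col_at_position(text, pos):
--     lines = text.splitlines(keepends=True)
--     n = len(text)
--
--     if pos > n:
--         return None, None, None, None
--
--     # Special handling of EOF
--     if pos == n:
--         prev_line = lines[-2].rstrip("\n\r") if len(lines) > 1 else None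
--         return len(lines) - 1, len(lines[-1]), lines[-1].rstrip("\n\r"), prev_line
--
--     if pos < 0:
--         return None, None, None, None
--
--     # Cumulative line-start offsets, then binary search for the line
--     # containing pos instead of a linear scan.
--     starts = [0]
--     total = 0
--     for line in lines:
--         total += len(line)
--         starts.append(total)
--
--     lo, hi = 0, len(lines) - 1
--     while lo < hi:
--         mid = (lo + hi + 1) // 2
--         if starts[mid] <= pos:
--             lo = mid
--         else:
--             hi = mid - 1
--
--     prev_line = lines[lo - 1].rstrip("\n\r") if lo > 0 else None
--     return lo, pos - starts[lo], lines[lo].rstrip("\n\r"), prev_line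
-- ===== Notes on version B (the rewrite author's own statement) =====
-- stated objective: alternative
-- what changed: Replaces the linear enumerate-and-accumulate scan over the split lines with a cumulative line-start offset table plus a binary search for the line containing pos (overall cost still dominated by the splitlines pass).
import Mathlib
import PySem

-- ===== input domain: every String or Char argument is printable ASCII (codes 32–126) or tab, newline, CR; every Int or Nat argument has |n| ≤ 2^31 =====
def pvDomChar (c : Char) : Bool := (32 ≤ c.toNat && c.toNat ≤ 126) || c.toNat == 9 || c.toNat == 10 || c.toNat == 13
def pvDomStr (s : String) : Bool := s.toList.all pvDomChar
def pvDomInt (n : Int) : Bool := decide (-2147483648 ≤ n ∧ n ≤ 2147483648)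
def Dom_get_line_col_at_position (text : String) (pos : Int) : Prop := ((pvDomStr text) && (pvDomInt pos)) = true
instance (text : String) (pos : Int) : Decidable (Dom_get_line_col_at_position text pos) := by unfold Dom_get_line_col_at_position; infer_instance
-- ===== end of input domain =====

-- B replaces A's linear enumerate-and-accumulate scan over the split lines by a
-- cumulative offset table plus a binary search for the line containing pos.

-- ===== SHARED PY PRIMITIVES (hand ports; both Pythons make these identical calls) =====
-- text.splitlines(keepends=True): exact for '\n', '\r', '\r\n' — the only line
-- breaks occurring in the printable-ASCII+tab+NL+CR input domain.
def pvSplitKeep (acc : List Char) (s : List Char) : List (List Char) :=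
  match s with
  | [] => if acc.isEmpty then [] else [acc.reverse]
  | c :: cs =>
    if c = '\n' then (acc.reverse ++ ['\n']) :: pvSplitKeep [] cs
    else if c = '\r' then
      if cs.head? = some '\n' then (acc.reverse ++ ['\r', '\n']) :: pvSplitKeep [] cs.tail
      else (acc.reverse ++ ['\r']) :: pvSplitKeep [] cs
    else pvSplitKeep (c :: acc) cs
termination_by s.length
decreasing_by all_goals (simp; try omega)

-- s.rstrip("\n\r"): drop trailing '\n'/'\r' characters (exact for any string).
def pvRstripNl (l : List Char) : String :=
  String.ofList (l.reverse.dropWhile (fun c => c = '\n' || c = '\r')).reverse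

-- ===== PORT A =====
def pvGoA (pos : Int) (idx cur : Int) (prev : Option (List Char)) :
    List (List Char) → Option Int × Option Int × Option String × Option String
  | [] => (none, none, none, none)
  | l :: ls =>
    if cur ≤ pos ∧ pos < cur + (l.length : Int) then
      (some idx, some (pos - cur), some (pvRstripNl l), prev.map pvRstripNl)
    else pvGoA pos (idx + 1) (cur + (l.length : Int)) (some l) ls

def get_line_col_at_position (text : String) (pos : Int) :
    Option Int × Option Int × Option String × Option String :=
  let lines := pvSplitKeep [] text.toList
  let n : Int := (text.toList.length : Int)
  if pos > n then (none, none, none, none)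
  else if pos = n then
    -- lines[-1] raises IndexError when text = "" (then pos = 0): excluded by Pre_
    let last := (PySem.List.pyGet? lines (-1)).getD []
    let prev : Option String :=
      if 1 < lines.length then some (pvRstripNl ((PySem.List.pyGet? lines (-2)).getD []))
      else none
    (some ((lines.length : Int) - 1), some (last.length : Int), some (pvRstripNl last), prev)
  else pvGoA pos 0 0 none lines

-- ===== PORT B =====
-- while lo < hi: mid = (lo+hi+1)//2; move lo or hi — hi - lo shrinks each turn
def pvBsearch (S : List Int) (pos : Int) (lo hi : Int) : Int :=
  if h : lo < hi then
    let mid := PySem.Int.floordiv (lo + hi + 1) 2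
    if ((PySem.List.pyGet? S mid).getD 0) ≤ pos then pvBsearch S pos mid hi
    else pvBsearch S pos lo (mid - 1)
  else lo
termination_by (hi - lo).toNat
decreasing_by
  all_goals
    have h2 : PySem.Int.floordiv (lo + hi + 1) 2 = (lo + hi + 1) / 2 :=
      PySem.Int.floordiv_eq_ediv_of_pos (by omega)
    simp only [mid, h2] at *
    omega

def get_line_col_at_position_alt (text : String) (pos : Int) :
    Option Int × Option Int × Option String × Option String :=
  let lines := pvSplitKeep [] text.toList
  let n : Int := (text.toList.length : Int)
  if pos > n then (none, none, none, none)
  else if pos = n then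
    let last := (PySem.List.pyGet? lines (-1)).getD []
    let prev : Option String :=
      if 1 < lines.length then some (pvRstripNl ((PySem.List.pyGet? lines (-2)).getD []))
      else none
    (some ((lines.length : Int) - 1), some (last.length : Int), some (pvRstripNl last), prev)
  else if pos < 0 then (none, none, none, none)
  else
    let starts :=
      (lines.foldl (fun (p : List Int × Int) l =>
        (p.1 ++ [p.2 + (l.length : Int)], p.2 + (l.length : Int))) ([0], 0)).1
    let lo := pvBsearch starts pos 0 ((lines.length : Int) - 1)
    let prev : Option String :=
      if 0 < lo then some (pvRstripNl ((PySem.List.pyGet? lines (lo - 1)).getD []))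
      else none
    (some lo, some (pos - (PySem.List.pyGet? starts lo).getD 0),
      some (pvRstripNl ((PySem.List.pyGet? lines lo).getD [])), prev)

-- ===== PRECONDITION & SPEC =====
-- Pre_ excludes exactly (text = "", pos = 0): there A's EOF branch evaluates
-- lines[-1] on an empty list and raises IndexError (B raises there too).
def Pre_get_line_col_at_position (text : String) (pos : Int) : Prop :=
  ¬(text = "" ∧ pos = 0)
instance (text : String) (pos : Int) : Decidable (Pre_get_line_col_at_position text pos) := by
  unfold Pre_get_line_col_at_position; infer_instance

def pvWitness_get_line_col_at_position : String × Int := ("ab\ncd\n", 4)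

def Spec_get_line_col_at_position (text : String) (pos : Int) (out : Option Int × Option Int × Option String × Option String) : Prop := out = get_line_col_at_position_alt text pos
instance (text : String) (pos : Int) (out : Option Int × Option Int × Option String × Option String) : Decidable (Spec_get_line_col_at_position text pos out) := by unfold Spec_get_line_col_at_position; infer_instance

-- ===== CLAIM (what is proved, stated in full; the proofs are below) =====
def Claim_equal_get_line_col_at_position : Prop := ∀ (text : String) (pos : Int), Dom_get_line_col_at_position text pos → Pre_get_line_col_at_position text pos → Spec_get_line_col_at_position text pos (get_line_col_at_position text pos)

-- ===== LEMMAS AND PROOFS =====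

theorem splitKeep_sum (acc : List Char) (cs : List Char) :
    ((pvSplitKeep acc cs).map List.length).sum = acc.length + cs.length := by
  induction acc, cs using pvSplitKeep.induct with
  | case1 acc h => rw [pvSplitKeep]; simp_all
  | case2 acc h => rw [pvSplitKeep]; simp_all [List.isEmpty_iff]
  | case3 acc cs ih => rw [pvSplitKeep]; simp [ih]; omega
  | case4 acc cs hh _ ih =>
      rw [pvSplitKeep]; simp only [if_neg (by decide : ¬('\r' : Char) = '\n'), if_pos hh]
      have : cs.length = cs.tail.length + 1 := by
        cases cs with | nil => simp at hh | cons d cs' => simp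
      simp [ih]; omega
  | case5 acc cs hh _ ih =>
      rw [pvSplitKeep]; simp only [if_neg (by decide : ¬('\r' : Char) = '\n'), if_neg hh]
      simp [ih]; omega
  | case6 acc c cs hc hr ih =>
      rw [pvSplitKeep]; simp only [if_neg hc, if_neg hr]; simp [ih]; omega

-- cumulative line starts: startsOf ls c = [c, c+|l0|, c+|l0|+|l1|, …]
def startsOf : List (List Char) → Int → List Int
  | [], c => [c]
  | l :: ls, c => c :: startsOf ls (c + (l.length : Int))

theorem startsOf_length (ls : List (List Char)) (c : Int) :
    (startsOf ls c).length = ls.length + 1 := by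
  induction ls generalizing c with
  | nil => rfl
  | cons l ls ih => simp [startsOf, ih]

theorem startsOf_get (ls : List (List Char)) (c : Int) (i : Nat) (hi : i ≤ ls.length) :
    (startsOf ls c)[i]! = c + (((ls.take i).map List.length).sum : Int) := by
  induction ls generalizing c i with
  | nil =>
      have : i = 0 := by simpa using hi
      subst this; simp [startsOf]
  | cons l ls ih =>
      cases i with
      | zero => simp [startsOf]
      | succ i =>
          have hlt : i + 1 < (startsOf (l :: ls) c).length := by
            rw [startsOf_length]; simpa using Nat.succ_lt_succ (Nat.lt_succ_of_le (by simpa using hi))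
          rw [getElem!_pos (startsOf (l :: ls) c) (i+1) hlt]
          simp only [startsOf, List.getElem_cons_succ]
          rw [← getElem!_pos (startsOf ls (c + (l.length : Int))) i
                (by rw [startsOf_length]; simpa using hi)]
          rw [ih _ _ (by simpa using hi)]
          simp
          ring

theorem startsOf_mono (ls : List (List Char)) (c : Int) (i j : Nat)
    (hij : i ≤ j) (hj : j ≤ ls.length) :
    (startsOf ls c)[i]! ≤ (startsOf ls c)[j]! := by
  rw [startsOf_get ls c i (le_trans hij hj), startsOf_get ls c j hj]
  have h := List.take_add (l := ls) (i := i) (j := j - i)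
  rw [Nat.add_sub_cancel' hij] at h
  have : ((ls.take i).map List.length).sum ≤ ((ls.take j).map List.length).sum := by
    rw [h]; simp
  omega

-- A's loop: misses every line when pos is left of cur
theorem goA_none (ls : List (List Char)) (pos idx cur : Int)
    (prev : Option (List Char)) (h : pos < cur) :
    pvGoA pos idx cur prev ls = (none, none, none, none) := by
  induction ls generalizing idx cur prev with
  | nil => rfl
  | cons l ls ih =>
      rw [pvGoA, if_neg (by omega)]
      exact ih _ _ _ (by omega)

-- A's loop hits line k when the cumulative starts say pos lies in line k
theorem goA_spec (ls : List (List Char)) (pos : Int) : ∀ (idx cur : Int)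
    (prev : Option (List Char)) (k : Nat), k < ls.length →
    cur ≤ pos →
    (startsOf ls cur)[k]! ≤ pos → pos < (startsOf ls cur)[k+1]! →
    pvGoA pos idx cur prev ls =
      (some (idx + k), some (pos - (startsOf ls cur)[k]!), some (pvRstripNl (ls[k]!)),
        if k = 0 then prev.map pvRstripNl else some (pvRstripNl (ls[k-1]!))) := by
  induction ls with
  | nil => intro _ _ _ k hk; simp at hk
  | cons l ls ih =>
      intro idx cur prev k hk hcur h1 h2
      have hcons : ∀ m : Nat, (startsOf (l :: ls) cur)[m+1]! =
          (startsOf ls (cur + (l.length : Int)))[m]! := by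
        intro m
        by_cases hm : m < (startsOf ls (cur + (l.length : Int))).length
        · rw [getElem!_pos (startsOf (l :: ls) cur) (m+1)
                (by simp only [startsOf_length] at hm ⊢; simp; omega),
              getElem!_pos (startsOf ls (cur + (l.length : Int))) m hm]
          simp [startsOf]
        · have hm' := Nat.le_of_not_lt hm
          rw [startsOf_length] at hm'
          rw [getElem!_neg (startsOf (l :: ls) cur) (m+1) (by rw [startsOf_length]; simp; omega),
              getElem!_neg (startsOf ls (cur + (l.length : Int))) m hm]
      cases k with
      | zero =>
          have hs0 : (startsOf (l :: ls) cur)[0]! = cur := by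
            rw [startsOf_get _ _ 0 (by omega)]; simp
          have hs1 : (startsOf (l :: ls) cur)[1]! = cur + (l.length : Int) := by
            rw [startsOf_get _ _ 1 (by simp)]; simp [List.take_succ_cons]
          rw [hs0] at h1 ⊢
          rw [hs1] at h2
          rw [pvGoA, if_pos ⟨h1, h2⟩]
          simp
      | succ k =>
          rw [hcons] at h1 h2
          have hk' : k < ls.length := by simpa using hk
          have h0 : (startsOf ls (cur + (l.length : Int)))[0]! = cur + (l.length : Int) := by
            rw [startsOf_get _ _ 0 (by omega)]; simp
          have hcur' : cur + (l.length : Int) ≤ pos := by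
            have hm := startsOf_mono ls (cur + (l.length : Int)) 0 k (by omega) hk'.le
            rw [h0] at hm
            omega
          rw [pvGoA, if_neg (by omega)]
          rw [ih (idx + 1) (cur + (l.length : Int)) (some l) k hk' hcur' h1 h2]
          rw [hcons]
          have hgk : (l :: ls)[k+1]! = ls[k]! := by
            rw [getElem!_pos (l :: ls) (k+1) (by simpa using hk), getElem!_pos ls k hk']
            simp
          simp only [Prod.mk.injEq, Option.some.injEq, Nat.succ_ne_zero, if_false,
            Nat.add_sub_cancel]
          refine ⟨by push_cast; ring, ?_⟩
          cases k with
          | zero =>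
              simp
          | succ k' =>
              have hgk' : (l :: ls)[k'+1]! = ls[k']! := by
                rw [getElem!_pos (l :: ls) (k'+1) (by simp at hk ⊢; omega),
                    getElem!_pos ls k' (by simp at hk; omega)]
                simp
              simp [hgk']

-- B's starts-building foldl computes startsOf
theorem foldl_starts (ls : List (List Char)) (pre : List Int) (t : Int) :
    (ls.foldl (fun (p : List Int × Int) l =>
        (p.1 ++ [p.2 + (l.length : Int)], p.2 + (l.length : Int))) (pre ++ [t], t)).1 =
      pre ++ startsOf ls t := by
  induction ls generalizing pre t with
  | nil => simp [startsOf]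
  | cons l ls ih =>
      simp only [List.foldl_cons]
      have h := ih (pre ++ [t]) (t + (l.length : Int))
      rw [show pre ++ [t] ++ [t + (l.length : Int)] = (pre ++ [t]) ++ [t + (l.length : Int)] from rfl] at *
      rw [h]
      simp [startsOf]

-- binary search: finds the greatest index in [lo, hi] whose start is ≤ pos
theorem bsearch_spec (S : List Int) (pos : Int) : ∀ (lo hi : Int),
    0 ≤ lo → lo ≤ hi → hi < (S.length : Int) →
    S[lo.toNat]! ≤ pos →
    (∀ i j : Nat, i ≤ j → j < S.length → S[i]! ≤ S[j]!) →
    lo ≤ pvBsearch S pos lo hi ∧ pvBsearch S pos lo hi ≤ hi ∧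
      S[(pvBsearch S pos lo hi).toNat]! ≤ pos ∧
      ∀ j : Int, pvBsearch S pos lo hi < j → j ≤ hi → pos < S[j.toNat]! := by
  intro lo hi
  induction lo, hi using pvBsearch.induct S pos with
  | case1 lo hi h mid hc ih =>
      intro hlo hle hhi hs mono
      have hmid : mid = (lo + hi + 1) / 2 := PySem.Int.floordiv_eq_ediv_of_pos (by omega)
      have hmlo : lo < mid := by omega
      have hmhi : mid ≤ hi := by omega
      have hget : ((PySem.List.pyGet? S mid).getD 0) = S[mid.toNat]! := by
        rw [show mid = ((mid.toNat : Nat) : Int) from by omega, PySem.List.pyGet?_natCast]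
        simp only [Int.toNat_natCast]
        rw [getElem!_pos S mid.toNat (by omega),
            List.getElem?_eq_getElem (by omega : mid.toNat < S.length)]
        rfl
      rw [hget] at hc
      rw [pvBsearch, dif_pos h, if_pos (by rw [hget]; exact hc)]
      rw [show PySem.Int.floordiv (lo + hi + 1) 2 = mid from rfl]
      obtain ⟨i1, i2, i3, i4⟩ := ih (by omega) (by omega) hhi hc mono
      exact ⟨by omega, i2, i3, i4⟩
  | case2 lo hi h mid hc ih =>
      intro hlo hle hhi hs mono
      have hmid : mid = (lo + hi + 1) / 2 := PySem.Int.floordiv_eq_ediv_of_pos (by omega)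
      have hmlo : lo < mid := by omega
      have hmhi : mid ≤ hi := by omega
      have hget : ((PySem.List.pyGet? S mid).getD 0) = S[mid.toNat]! := by
        rw [show mid = ((mid.toNat : Nat) : Int) from by omega, PySem.List.pyGet?_natCast]
        simp only [Int.toNat_natCast]
        rw [getElem!_pos S mid.toNat (by omega),
            List.getElem?_eq_getElem (by omega : mid.toNat < S.length)]
        rfl
      rw [hget] at hc
      rw [not_le] at hc
      rw [pvBsearch, dif_pos h, if_neg (by rw [hget]; omega)]
      rw [show PySem.Int.floordiv (lo + hi + 1) 2 = mid from rfl]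
      obtain ⟨i1, i2, i3, i4⟩ := ih hlo (by omega) (by omega) hs mono
      refine ⟨i1, by omega, i3, ?_⟩
      intro j hj1 hj2
      by_cases hj3 : j ≤ mid - 1
      · exact i4 j hj1 hj3
      · calc pos < S[mid.toNat]! := hc
          _ ≤ S[j.toNat]! := mono _ _ (by omega) (by omega)
  | case3 lo hi h =>
      intro hlo hle hhi hs mono
      rw [pvBsearch, dif_neg h]
      exact ⟨le_refl _, by omega, hs, by omega⟩

theorem pyGetD_eq_getElem! {α : Type} [Inhabited α] (S : List α) (r : Int) (d : α)
    (h0 : 0 ≤ r) (h1 : r.toNat < S.length) :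
    (PySem.List.pyGet? S r).getD d = S[r.toNat]! := by
  rw [show r = ((r.toNat : Nat) : Int) from by omega, PySem.List.pyGet?_natCast]
  simp only [Int.toNat_natCast]
  rw [getElem!_pos S r.toNat h1, List.getElem?_eq_getElem h1]
  rfl

-- ===== VERDICT (by name: the statement is the Claim_ definition above) =====
theorem get_line_col_at_position_spec : Claim_equal_get_line_col_at_position := by
  intro text pos _ _
  unfold Spec_get_line_col_at_position get_line_col_at_position get_line_col_at_position_alt
  dsimp only
  by_cases hgt : (text.toList.length : Int) < pos
  · rw [if_pos hgt, if_pos hgt]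
  rw [if_neg hgt, if_neg hgt]
  by_cases heq : pos = (text.toList.length : Int)
  · rw [if_pos heq, if_pos heq]
  rw [if_neg heq, if_neg heq]
  by_cases hneg : pos < 0
  · rw [if_pos hneg, goA_none (pvSplitKeep [] text.toList) pos 0 0 none hneg]
  rw [if_neg hneg]
  -- main case: 0 ≤ pos < len(text)
  have hpos : 0 ≤ pos := by omega
  have hlt : pos < (text.toList.length : Int) := by omega
  set cs := text.toList with hcs
  set lines := pvSplitKeep [] cs with hlines
  set S := startsOf lines 0 with hS
  have hsum : ((lines.map List.length).sum : Int) = (cs.length : Int) := by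
    rw [hlines, splitKeep_sum]; simp
  have hLpos : 0 < lines.length := by
    rcases lines with _ | ⟨l, ls⟩
    · simp at hsum; omega
    · simp
  have hSlen : S.length = lines.length + 1 := startsOf_length lines 0
  have hmono : ∀ i j : Nat, i ≤ j → j < S.length → S[i]! ≤ S[j]! := by
    intro i j hij hj
    exact startsOf_mono lines 0 i j hij (by omega)
  have hS0 : S[0]! = 0 := by
    rw [hS, startsOf_get lines 0 0 (by omega)]; simp
  have hStop : S[lines.length]! = (cs.length : Int) := by
    rw [hS, startsOf_get lines 0 lines.length (le_refl _)]
    simp [hsum]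
  obtain ⟨i1, i2, i3, i4⟩ := bsearch_spec S pos 0 ((lines.length : Int) - 1)
    (le_refl 0) (by omega) (by omega)
    (by rw [show (0 : Int).toNat = 0 from rfl, hS0]; exact hpos) hmono
  set r := pvBsearch S pos 0 ((lines.length : Int) - 1) with hr
  set k := r.toNat with hk
  have hrk : r = (k : Int) := by omega
  have hkL : k < lines.length := by omega
  have h1 : S[k]! ≤ pos := i3
  have h2 : pos < S[k+1]! := by
    by_cases hkl : (k : Int) + 1 ≤ (lines.length : Int) - 1
    · have := i4 ((k : Int) + 1) (by omega) (by omega)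
      rwa [show ((k : Int) + 1).toNat = k + 1 from by omega] at this
    · have hke : k + 1 = lines.length := by omega
      rw [hke, hStop]; omega
  have hA := goA_spec lines pos 0 0 none k hkL hpos (by rw [← hS] at *; exact h1) (by rw [← hS] at *; exact h2)
  have hfold : (lines.foldl (fun (p : List Int × Int) l =>
      (p.1 ++ [p.2 + (l.length : Int)], p.2 + (l.length : Int))) ([0], 0)).1 = S := by
    have := foldl_starts lines [] 0
    simpa using this
  rw [hfold, hA, ← hr]
  have hgetS : (PySem.List.pyGet? S r).getD 0 = S[k]! :=
    pyGetD_eq_getElem! S r 0 (by omega) (by omega)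
  have hgetL : (PySem.List.pyGet? lines r).getD [] = lines[k]! :=
    pyGetD_eq_getElem! lines r [] (by omega) (by omega)
  simp only [Prod.mk.injEq, Option.some.injEq]
  refine ⟨by omega, by rw [hgetS], by rw [hgetL], ?_⟩
  by_cases hk0 : k = 0
  · rw [if_pos hk0, if_neg (by omega)]
    simp
  · rw [if_neg hk0, if_pos (by omega)]
    have hgetP : (PySem.List.pyGet? lines (r - 1)).getD [] = lines[k-1]! := by
      have := pyGetD_eq_getElem! lines (r - 1) [] (by omega) (by omega)
      rwa [show (r - 1).toNat = k - 1 from by omega] at this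
    rw [hgetP]
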